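-- pv_equiv track=rewrite | github.com/1000chw/baekjoon_solve | 백준/Gold/3663. 고득점/고득점.py | solve
-- ===== SOURCE A (Python) =====
-- def solve(s):
--     joy = 0
--     ls = len(s)
--     for i in range(ls):
--         joy += min(ord(s[i])-ord('A'), ord('Z')-ord(s[i])+1)
--     if 'A' not in s:
--         joy += ls-1
--         return joy
--     else:
--         isA = s[0] == 'A'
--         left = 0
--         notA = []
--         for i in range(ls):
--             if not isA:
--                 if s[i] == 'A':
--                     notA.append((left, i-1))
--                     isA = True
--             else:
--                 if s[i] != 'A':
--                     isA = False
--                     left = i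
--         if s[-1] != 'A':
--             notA.append((left, ls-1))
--         notA.append((ls, 0))
--         return chk_min_move(notA, ls) + joy
--
-- def chk_min_move(notA, ls):
--     res = ls-notA[0][0]
--     for i in range(len(notA)-1):
--         res = min(res, notA[i][1]*2+ls-notA[i+1][0], (ls-notA[i+1][0])*2+notA[i][1])
--     return res
-- ===== SOURCE B (Python) =====
-- def solve(s):
--     ls = len(s)
--     joy = sum(min(ord(c) - 65, 91 - ord(c)) for c in s)
--     # nxt[k] = smallest index >= k holding a non-'A' char (ls if there is none)
--     nxt = [ls] * (ls + 1)
--     for k in range(ls - 1, -1, -1):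
--         nxt[k] = k if s[k] != 'A' else nxt[k + 1]
--     # for every split point k: clean everything left of k by moving right first
--     # (to the last non-'A' index before k), everything at/after k by wrapping left;
--     # take the cheaper of right-then-left and left-then-right, minimise over k
--     best = None
--     r = 0  # rightmost non-'A' index strictly before k (0 if there is none)
--     for k in range(ls + 1):
--         left = ls - nxt[k]
--         cost = min(2 * r + left, r + 2 * left)
--         best = cost if best is None or cost < best else best
--         if k < ls and s[k] != 'A':
--             r = k
--     return joy + best
-- ===== Notes on version B (the rewrite author's own statement) =====
-- stated objective: alternative
-- what changed: B never extracts non-'A' runs or an 'A'-membership branch: it scans every split point k with a suffix array nxt (first non-'A' index at/after k) and a running last non-'A' index, minimising min(2r+left, r+2left) over all k, which provably attains A's run-boundary minimum.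
-- intended difference: On the empty string A returns -1 (its 'A' not in s branch adds ls-1 = -1 to a zero joy); B returns 0, the correct total of zero joy and zero moves for an empty name. — e.g. on solve(""): A returns -1, B returns 0
import Mathlib
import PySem

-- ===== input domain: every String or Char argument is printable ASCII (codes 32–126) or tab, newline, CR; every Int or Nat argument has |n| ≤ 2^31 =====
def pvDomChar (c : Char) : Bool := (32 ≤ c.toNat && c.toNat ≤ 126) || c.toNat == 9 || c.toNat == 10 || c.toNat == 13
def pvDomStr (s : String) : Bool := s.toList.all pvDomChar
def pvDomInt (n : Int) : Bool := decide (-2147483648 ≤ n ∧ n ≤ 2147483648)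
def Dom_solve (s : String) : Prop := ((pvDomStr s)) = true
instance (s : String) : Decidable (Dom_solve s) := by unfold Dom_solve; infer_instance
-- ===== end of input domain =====

-- B drops A's run extraction and 'A'-membership branch entirely: it scans every split
-- point k, combining a suffix table (first non-'A' index at/after k) with a running
-- last non-'A' index, and minimises min(2r+left, r+2left) over all k; objective:
-- alternative algorithm, no speed claim.

-- ===== PORT A =====
-- A's loop body: state (isA, left, notA), input (i, s[i])
def solveStep (st : Bool × Int × List (Int × Int)) (ic : Int × Char) : Bool × Int × List (Int × Int) :=
  if !st.1 then
    if ic.2 = 'A' then (true, st.2.1, st.2.2 ++ [(st.2.1, ic.1 - 1)]) else st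
  else
    if ic.2 ≠ 'A' then (false, ic.1, st.2.2) else st

-- A's helper chk_min_move; notA always carries the (ls, 0) sentinel, so the indices
-- 0, i, i+1 are in range and pyGetD's default (0, 0) is never read.
def chk_min_move (notA : List (Int × Int)) (ls : Int) : Int :=
  (PySem.List.pyRange 0 ((notA.length : Int) - 1) 1).foldl
    (fun res i =>
      min (min res ((PySem.List.pyGetD notA i (0, 0)).2 * 2 + ls -
                      (PySem.List.pyGetD notA (i + 1) (0, 0)).1))
          ((ls - (PySem.List.pyGetD notA (i + 1) (0, 0)).1) * 2 +
             (PySem.List.pyGetD notA i (0, 0)).2))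
    (ls - (PySem.List.pyGetD notA 0 (0, 0)).1)

def solve (s : String) : Int :=
  let cs := s.toList
  let ls : Int := cs.length
  let joy := cs.foldl (fun j c => j + min ((c.toNat : Int) - 65) (90 - (c.toNat : Int) + 1)) 0
  if PySem.Str.isIn "A" s = false then
    joy + ls - 1
  else
    -- s is nonempty here ('A' in s), so s[0] / s[-1] cannot raise; pyGet? returns some
    let st := (PySem.List.enumerate cs).foldl solveStep
      ((PySem.List.pyGet? cs 0 == some 'A'), 0, [])
    let notA := if PySem.List.pyGet? cs (-1) != some 'A'
                then st.2.2 ++ [(st.2.1, ls - 1)] else st.2.2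
    chk_min_move (notA ++ [(ls, 0)]) ls + joy

-- ===== PORT B =====
-- Source B's backward fill of nxt: entry k is k itself if s[k] ≠ 'A', else entry k+1;
-- the final entry (index ls) stays ls
def nxtAux : List Char → Int → List Int
  | [], i => [i]
  | c :: t, i => (if c ≠ 'A' then i else (nxtAux t (i + 1)).headI) :: nxtAux t (i + 1)

def solve_alt (s : String) : Int :=
  let cs := s.toList
  let ls : Int := cs.length
  let joy := (cs.map (fun c => min ((c.toNat : Int) - 65) (91 - (c.toNat : Int)))).sum
  let nxt := nxtAux cs 0
  -- Source B's forward loop over k in range(ls+1): state (best, r)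
  let res := (PySem.List.pyRange 0 (ls + 1) 1).foldl
    (fun (st : Option Int × Int) k =>
      let left := ls - PySem.List.pyGetD nxt k 0
      let cost := min (2 * st.2 + left) (st.2 + 2 * left)
      ((match st.1 with
        | none => some cost
        | some b => if cost < b then some cost else some b),
       if k < ls && (PySem.List.pyGetD cs k 'A' != 'A') then k else st.2))
    (none, 0)
  -- best is not None: the loop runs at least once (k = 0)
  joy + res.1.getD 0

-- ===== PRECONDITION & SPEC =====
-- On the empty string A returns -1 (its "'A' not in s" branch adds ls-1 = -1 to a zero
-- joy); B returns 0, the correct total of zero joy and zero moves for an empty name.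
def D_solve (s : String) : Prop := s = ""
instance (s : String) : Decidable (D_solve s) := by unfold D_solve; infer_instance
def Spec_solve (s : String) (out : Int) : Prop := ¬ D_solve s → out = solve_alt s
instance (s : String) (out : Int) : Decidable (Spec_solve s out) := by unfold Spec_solve; infer_instance
def pvDiffWitness_solve : String := ""
def pvDiffWitnessOut_solve : Int × Int := (-1, 0)

-- ===== CLAIM (what is proved, stated in full; the proofs are below) =====
def Claim_unchanged_solve : Prop := ∀ (s : String), Dom_solve s → Spec_solve s (solve s)
def Claim_changed_solve : Prop := Dom_solve (pvDiffWitness_solve) ∧ D_solve (pvDiffWitness_solve) ∧ solve (pvDiffWitness_solve) = pvDiffWitnessOut_solve.1 ∧ solve_alt (pvDiffWitness_solve) = pvDiffWitnessOut_solve.2 ∧ pvDiffWitnessOut_solve.1 ≠ pvDiffWitnessOut_solve.2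
def Claim_exact_solve : Prop := ∀ (s : String), Dom_solve s → D_solve s → solve s ≠ solve_alt s

-- ===== LEMMAS AND PROOFS =====

-- ---- shared index-level vocabulary (proof layer only) ----

-- "index k holds a non-'A' char" (false out of range)
def goodC (cs : List Char) (k : Nat) : Bool := cs.getD k 'A' != 'A'

-- first non-'A' index ≥ k (cs.length if none)
def nFL (cs : List Char) (k : Nat) : Nat := k + (cs.drop k).findIdx (fun c => c != 'A')

-- last non-'A' index < k (0 if none) — B's running r
def rFL (cs : List Char) : Nat → Nat
  | 0 => 0
  | k + 1 => if goodC cs k then k else rFL cs k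

-- B's per-split cost
def gK (cs : List Char) (k : Nat) : Int :=
  min (2 * (rFL cs k : Int) + ((cs.length : Int) - (nFL cs k : Int)))
      ((rFL cs k : Int) + 2 * ((cs.length : Int) - (nFL cs k : Int)))

-- running minimum of gK over 0..K
def mval (cs : List Char) : Nat → Int
  | 0 => gK cs 0
  | K + 1 => min (mval cs K) (gK cs (K + 1))

-- reference form of the maximal non-'A' runs of a char list (A-side proof vocabulary)
def runsAux : List Char → Option Int → Int → List (Int × Int)
  | [], none, _ => []
  | [], some l, i => [(l, i - 1)]
  | c :: t, none, i => if c = 'A' then runsAux t none (i + 1) else runsAux t (some i) (i + 1)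
  | c :: t, some l, i => if c = 'A' then (l, i - 1) :: runsAux t none (i + 1) else runsAux t (some l) (i + 1)

-- ---- basic facts about goodC / nFL / rFL ----

lemma goodC_lt (cs : List Char) (k : Nat) (h : goodC cs k = true) : k < cs.length := by
  by_contra hk
  simp [goodC, List.getD_eq_getElem?_getD, List.getElem?_eq_none (by omega : cs.length ≤ k)] at h

lemma getD_eq_of_drop (cs : List Char) (m : Nat) (c : Char) (t : List Char)
    (h : cs.drop m = c :: t) : cs.getD m 'A' = c := by
  have h0 : cs[m]? = some c := by
    have h1 : (cs.drop m)[0]? = cs[m + 0]? := List.getElem?_drop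
    rw [h] at h1; simpa using h1.symm
  simp [List.getD_eq_getElem?_getD, h0]

lemma nFL_top (cs : List Char) : nFL cs cs.length = cs.length := by
  simp [nFL]

lemma nFL_of_good (cs : List Char) (k : Nat) (h : goodC cs k = true) : nFL cs k = k := by
  have hk := goodC_lt cs k h
  obtain ⟨c, t, hd⟩ : ∃ c t, cs.drop k = c :: t := by
    cases hdrop : cs.drop k with
    | nil => exfalso; have := List.drop_eq_nil_iff.mp hdrop; omega
    | cons c t => exact ⟨c, t, rfl⟩
  have hgc : cs.getD k 'A' = c := getD_eq_of_drop cs k c t hd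
  have hc : (c != 'A') = true := by unfold goodC at h; rw [hgc] at h; exact h
  simp [nFL, hd, List.findIdx_cons, hc]

lemma nFL_of_bad (cs : List Char) (k : Nat) (hk : k < cs.length) (h : goodC cs k = false) :
    nFL cs k = nFL cs (k + 1) := by
  obtain ⟨c, t, hd⟩ : ∃ c t, cs.drop k = c :: t := by
    cases hdrop : cs.drop k with
    | nil => exfalso; have := List.drop_eq_nil_iff.mp hdrop; omega
    | cons c t => exact ⟨c, t, rfl⟩
  have hgc : cs.getD k 'A' = c := getD_eq_of_drop cs k c t hd
  have hc : (c != 'A') = false := by unfold goodC at h; rw [hgc] at h; exact h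
  have ht : cs.drop (k + 1) = t := by
    have h1 := congrArg (List.drop 1) hd
    rw [List.drop_drop] at h1
    simpa using h1
  simp [nFL, hd, ht, List.findIdx_cons, hc]
  omega

lemma nFL_le (cs : List Char) (k : Nat) (h : k ≤ cs.length) : nFL cs k ≤ cs.length := by
  have h2 : (cs.drop k).findIdx (fun c => c != 'A') ≤ (cs.drop k).length :=
    List.findIdx_le_length
  have h3 : (cs.drop k).length = cs.length - k := by simp
  unfold nFL; omega

-- all indices in [a, a+d) are 'A' → nFL is constant across
lemma nFL_congr_range (cs : List Char) (d a : Nat) (h : a + d ≤ cs.length)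
    (hb : ∀ i, a ≤ i → i < a + d → goodC cs i = false) : nFL cs a = nFL cs (a + d) := by
  induction d generalizing a with
  | zero => rfl
  | succ d ih =>
    have h1 : nFL cs a = nFL cs (a + 1) :=
      nFL_of_bad cs a (by omega) (hb a (by omega) (by omega))
    have h2 := ih (a + 1) (by omega) (fun i hi1 hi2 => hb i (by omega) (by omega))
    rw [h1, h2]; ring_nf

lemma nFL_all_bad (cs : List Char) (k : Nat) (h : k ≤ cs.length)
    (hb : ∀ i, k ≤ i → i < cs.length → goodC cs i = false) : nFL cs k = cs.length := by
  have := nFL_congr_range cs (cs.length - k) k (by omega)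
    (fun i hi1 hi2 => hb i hi1 (by omega))
  rw [this, show k + (cs.length - k) = cs.length by omega, nFL_top]

lemma rFL_all_bad (cs : List Char) (k : Nat) (hb : ∀ j, j < k → goodC cs j = false) :
    rFL cs k = 0 := by
  induction k with
  | zero => rfl
  | succ k ih =>
    simp [rFL, hb k (by omega)]
    exact ih (fun j hj => hb j (by omega))

lemma rFL_spec (cs : List Char) (k : Nat) (h : ∃ j, j < k ∧ goodC cs j = true) :
    goodC cs (rFL cs k) = true ∧ rFL cs k < k ∧
      ∀ j, rFL cs k < j → j < k → goodC cs j = false := by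
  induction k with
  | zero => obtain ⟨j, hj, _⟩ := h; omega
  | succ k ih =>
    by_cases hk : goodC cs k = true
    · refine ⟨by simp [rFL, hk], by simp [rFL, hk], ?_⟩
      intro j h1 h2
      simp [rFL, hk] at h1
      omega
    · have hk' : goodC cs k = false := by simpa using hk
      obtain ⟨j, hj, hgj⟩ := h
      have hjk : j < k := by
        rcases Nat.lt_succ_iff_lt_or_eq.mp hj with h | h
        · exact h
        · subst h; rw [hgj] at hk'; cases hk'
      obtain ⟨i1, i2, i3⟩ := ih ⟨j, hjk, hgj⟩
      refine ⟨by simpa [rFL, hk'] using i1, by simp [rFL, hk']; omega, ?_⟩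
      intro j' h1 h2
      simp [rFL, hk'] at h1 ⊢
      rcases Nat.lt_succ_iff_lt_or_eq.mp h2 with h | h
      · exact i3 j' h1 h
      · subst h; exact hk'

lemma rFL_succ_good (cs : List Char) (k : Nat) (h : goodC cs k = true) :
    rFL cs (k + 1) = k := by simp [rFL, h]

-- ---- B-side: reading nxt, and the loop invariant ----

lemma nxtAux_length (t : List Char) (i : Int) : (nxtAux t i).length = t.length + 1 := by
  induction t generalizing i with
  | nil => simp [nxtAux]
  | cons c t ih => simp [nxtAux, ih]

lemma nxtAux_getD (t : List Char) (i : Int) (k : Nat) (h : k ≤ t.length) :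
    (nxtAux t i).getD k 0 = i + (nFL t k : Int) := by
  induction t generalizing i k with
  | nil =>
    have hk : k = 0 := by simpa using h
    subst hk
    simp [nxtAux, nFL]
  | cons c t ih =>
    cases k with
    | zero =>
      by_cases hc : c = 'A'
      · obtain ⟨x, r, hx⟩ : ∃ x r, nxtAux t (i + 1) = x :: r := by
          cases hh : nxtAux t (i + 1) with
          | nil =>
            exfalso
            have := nxtAux_length t (i + 1)
            rw [hh] at this; simp at this
          | cons x r => exact ⟨x, r, rfl⟩
        have h1 := ih (i + 1) 0 (by omega)
        rw [hx] at h1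
        simp only [List.getD_cons_zero] at h1
        subst hc
        simp only [nxtAux, List.getD_cons_zero]
        rw [if_neg (by simp), hx]
        simp only [List.headI]
        have h2 : nFL ('A' :: t) 0 = nFL t 0 + 1 := by
          simp [nFL, List.findIdx_cons]
        rw [h2, h1]
        push_cast
        ring
      · have hcb : (c != 'A') = true := by simpa using hc
        simp only [nxtAux, List.getD_cons_zero]
        rw [if_pos hc]
        have h2 : nFL (c :: t) 0 = 0 := by simp [nFL, List.findIdx_cons, hcb]
        rw [h2]
        simp
    | succ k =>
      have hk : k ≤ t.length := by simpa using h
      have h1 := ih (i + 1) k hk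
      simp only [nxtAux, List.getD_cons_succ]
      rw [h1]
      have h2 : nFL (c :: t) (k + 1) = nFL t k + 1 := by
        simp [nFL, List.drop_succ_cons]
        omega
      rw [h2]
      push_cast
      ring

-- one loop step of B, at index K, from a state with r = rFL K
lemma step_eval (cs : List Char) (K : Nat) (hK : K ≤ cs.length) (b : Option Int) :
    (fun (st : Option Int × Int) (k : Int) =>
        let left := (cs.length : Int) - PySem.List.pyGetD (nxtAux cs 0) k 0
        let cost := min (2 * st.2 + left) (st.2 + 2 * left)
        ((match st.1 with
          | none => some cost
          | some b => if cost < b then some cost else some b),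
         if k < (cs.length : Int) && (PySem.List.pyGetD cs k 'A' != 'A') then k else st.2))
      (b, (rFL cs K : Int)) (K : Int)
    = ((match b with
        | none => some (gK cs K)
        | some v => some (min v (gK cs K))), (rFL cs (K + 1) : Int)) := by
  have hleft : (cs.length : Int) - PySem.List.pyGetD (nxtAux cs 0) (K : Int) 0
      = (cs.length : Int) - (nFL cs K : Int) := by
    rw [PySem.List.pyGetD_natCast, nxtAux_getD cs 0 K hK]
    ring_nf
  simp only [hleft]
  have hcost : min (2 * (rFL cs K : Int) + ((cs.length : Int) - (nFL cs K : Int)))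
      ((rFL cs K : Int) + 2 * ((cs.length : Int) - (nFL cs K : Int))) = gK cs K := rfl
  rw [hcost]
  refine Prod.ext ?_ ?_
  · cases b with
    | none => rfl
    | some v =>
      simp only []
      rw [min_def]
      split_ifs <;> first | rfl | omega
  · simp only [PySem.List.pyGetD_natCast]
    by_cases hlt : K < cs.length
    · have h1 : decide ((K : Int) < (cs.length : Int)) = true := by
        simp
        omega
      by_cases hg : goodC cs K = true
      · have hc : (decide ((K : Int) < (cs.length : Int)) && (cs.getD K 'A' != 'A')) = true := by
          rw [h1, show (cs.getD K 'A' != 'A') = true from hg]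
          rfl
        have hv : rFL cs (K + 1) = K := by simp [rFL, hg]
        rw [hc, hv, if_pos rfl]
      · have hg' : goodC cs K = false := by simpa using hg
        have hc : (decide ((K : Int) < (cs.length : Int)) && (cs.getD K 'A' != 'A')) = false := by
          rw [h1, show (cs.getD K 'A' != 'A') = false from hg']
          rfl
        have hv : rFL cs (K + 1) = rFL cs K := by simp [rFL, hg']
        rw [hc, hv]
        simp
    · have h1 : decide ((K : Int) < (cs.length : Int)) = false := by
        simp
        omega
      have hg' : goodC cs K = false := by
        have : cs.length ≤ K := by omega
        simp [goodC, List.getD_eq_getElem?_getD, List.getElem?_eq_none this]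
      have hc : (decide ((K : Int) < (cs.length : Int)) && (cs.getD K 'A' != 'A')) = false := by
        rw [h1]
        rfl
      have hv : rFL cs (K + 1) = rFL cs K := by simp [rFL, hg']
      rw [hc, hv]
      simp

-- B's loop: after processing k = 0..K, best = some (mval K) and r = rFL (K+1)
lemma loop_inv (cs : List Char) (K : Nat) (h : K ≤ cs.length) :
    (PySem.List.pyRange 0 ((K : Int) + 1) 1).foldl
      (fun (st : Option Int × Int) k =>
        let left := (cs.length : Int) - PySem.List.pyGetD (nxtAux cs 0) k 0
        let cost := min (2 * st.2 + left) (st.2 + 2 * left)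
        ((match st.1 with
          | none => some cost
          | some b => if cost < b then some cost else some b),
         if k < (cs.length : Int) && (PySem.List.pyGetD cs k 'A' != 'A') then k else st.2))
      (none, 0)
    = (some (mval cs K), (rFL cs (K + 1) : Int)) := by
  induction K with
  | zero =>
    rw [show ((0 : Nat) : Int) + 1 = 0 + 1 from by norm_num,
        PySem.List.pyRange_one_singleton, List.foldl_cons, List.foldl_nil]
    have h0 := step_eval cs 0 (by omega) none
    simp only [Nat.cast_zero] at h0
    exact h0
  | succ K ih =>
    have hK : K ≤ cs.length := by omega
    have hsplit : PySem.List.pyRange 0 (((K + 1 : Nat) : Int) + 1) 1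
        = PySem.List.pyRange 0 ((K : Int) + 1) 1 ++ [((K + 1 : Nat) : Int)] := by
      rw [show (((K + 1 : Nat) : Int) + 1) = ((K : Int) + 1) + 1 from by push_cast; ring]
      rw [PySem.List.pyRange_one_succ_right (by omega : (0 : Int) ≤ (K : Int) + 1)]
      congr 1
    rw [hsplit, List.foldl_append, ih hK, List.foldl_cons, List.foldl_nil]
    exact step_eval cs (K + 1) h (some (mval cs K))

-- mval is the minimum of gK over 0..K
lemma mval_le (cs : List Char) (K k : Nat) (h : k ≤ K) : mval cs K ≤ gK cs k := by
  induction K with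
  | zero => have : k = 0 := by omega
            subst this; simp [mval]
  | succ K ih =>
    by_cases h' : k ≤ K
    · rw [show mval cs (K + 1) = min (mval cs K) (gK cs (K + 1)) from rfl]
      exact le_trans (min_le_left _ _) (ih h')
    · have hk : k = K + 1 := by omega
      subst hk
      rw [show mval cs (K + 1) = min (mval cs K) (gK cs (K + 1)) from rfl]
      exact min_le_right _ _

lemma mval_mem (cs : List Char) (K : Nat) : ∃ k, k ≤ K ∧ mval cs K = gK cs k := by
  induction K with
  | zero => exact ⟨0, le_refl _, rfl⟩
  | succ K ih =>
    obtain ⟨k, hk, hv⟩ := ih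
    by_cases h : mval cs K ≤ gK cs (K + 1)
    · exact ⟨k, by omega, by
        rw [show mval cs (K + 1) = min (mval cs K) (gK cs (K + 1)) from rfl,
            min_eq_left h, hv]⟩
    · exact ⟨K + 1, le_refl _, by
        rw [show mval cs (K + 1) = min (mval cs K) (gK cs (K + 1)) from rfl,
            min_eq_right (not_le.mp h).le]⟩

-- ---- A-side: machine lemmas (relating the port's fold to runsAux) ----

-- joy: A's running foldl equals B's sum-of-map
lemma joy_eq (cs : List Char) : ∀ (a : Int),
    cs.foldl (fun j c => j + min ((c.toNat : Int) - 65) (90 - (c.toNat : Int) + 1)) a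
      = a + (cs.map (fun c => min ((c.toNat : Int) - 65) (91 - (c.toNat : Int)))).sum := by
  induction cs with
  | nil => simp
  | cons c t ih =>
    intro a
    simp only [List.foldl_cons, List.map_cons, List.sum_cons, ih]
    have : (90 - (c.toNat : Int) + 1) = 91 - (c.toNat : Int) := by ring
    rw [this]; ring

-- A's state machine, with the trailing "open run" closed iff the final isA is false,
-- computes runsAux
lemma machine_spec (t : List Char) : ∀ (n left : Int) (acc : List (Int × Int)) (b : Bool),
    (if ((PySem.List.enumerate t n).foldl solveStep (b, left, acc)).1
     then ((PySem.List.enumerate t n).foldl solveStep (b, left, acc)).2.2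
     else ((PySem.List.enumerate t n).foldl solveStep (b, left, acc)).2.2 ++
            [(((PySem.List.enumerate t n).foldl solveStep (b, left, acc)).2.1,
              n + (t.length : Int) - 1)])
      = acc ++ runsAux t (if b then none else some left) n := by
  induction t with
  | nil =>
    intro n left acc b
    cases b <;> simp [PySem.List.enumerate, runsAux]
  | cons c t ih =>
    intro n left acc b
    have hen : PySem.List.enumerate (c :: t) n = (n, c) :: PySem.List.enumerate t (n + 1) := rfl
    rw [hen, List.foldl_cons]
    have hlen : n + ((c :: t).length : Int) - 1 = (n + 1) + (t.length : Int) - 1 := by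
      push_cast [List.length_cons]; ring
    rw [hlen]
    by_cases hc : c = 'A' <;> cases b
    · have hs : solveStep (false, left, acc) (n, c) = (true, left, acc ++ [(left, n - 1)]) := by
        simp [solveStep, hc]
      rw [hs, ih]
      simp [runsAux, hc]
    · have hs : solveStep (true, left, acc) (n, c) = (true, left, acc) := by
        simp [solveStep, hc]
      rw [hs, ih]
      simp [runsAux, hc]
    · have hs : solveStep (false, left, acc) (n, c) = (false, left, acc) := by
        simp [solveStep, hc]
      rw [hs, ih]
      simp [runsAux, hc]
    · have hs : solveStep (true, left, acc) (n, c) = (false, n, acc) := by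
        simp [solveStep, hc]
      rw [hs, ih]
      simp [runsAux, hc]

-- the machine's final isA flag is "last char is 'A'"
lemma machine_isA (t : List Char) : ∀ (n : Int) (st0 : Bool × Int × List (Int × Int)), t ≠ [] →
    ((PySem.List.enumerate t n).foldl solveStep st0).1 = decide (t.getLast? = some 'A') := by
  induction t with
  | nil => intro n st0 h; exact absurd rfl h
  | cons c t ih =>
    intro n st0 _
    have hen : PySem.List.enumerate (c :: t) n = (n, c) :: PySem.List.enumerate t (n + 1) := rfl
    rw [hen, List.foldl_cons]
    cases t with
    | nil =>
      obtain ⟨b, l, a⟩ := st0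
      cases b <;> by_cases hc : c = 'A' <;>
        simp [PySem.List.enumerate, solveStep, hc]
    | cons d t' =>
      rw [ih (n + 1) _ (by simp)]
      simp [List.getLast?_cons_cons]

lemma pyGet?_neg_one' (cs : List Char) (h : cs ≠ []) :
    PySem.List.pyGet? cs (-1) = cs.getLast? := by
  have hl : 0 < cs.length := List.length_pos_iff.mpr h
  simp only [PySem.List.pyGet?, PySem.List.pyIdx?]
  rw [if_neg (by omega), if_pos (by omega)]
  norm_num
  rw [List.getLast?_eq_getElem?]

-- whether the machine starts in the isA state is irrelevant to runsAux on the full list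
lemma runsAux_head (cs : List Char) (h : cs ≠ []) :
    runsAux cs (if (PySem.List.pyGet? cs 0 == some 'A') then none else some 0) 0
      = runsAux cs none 0 := by
  cases cs with
  | nil => exact absurd rfl h
  | cons c t =>
    have h0 : PySem.List.pyGet? (c :: t) 0 = some c := by
      simp [PySem.List.pyGet?, PySem.List.pyIdx?]
    rw [h0]
    by_cases hc : c = 'A'
    · simp [hc]
    · rw [if_neg (by simpa using hc)]
      simp [runsAux, hc]

-- indexed reads over the range of adjacent positions = zip with the tail
lemma map_adjacent_eq_zip (l : List (Int × Int)) (h : l ≠ []) :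
    (PySem.List.pyRange 0 ((l.length : Int) - 1) 1).map
      (fun i => (PySem.List.pyGetD l i (0, 0), PySem.List.pyGetD l (i + 1) (0, 0)))
      = l.zip l.tail := by
  obtain ⟨m, hm⟩ : ∃ m, l.length = m + 1 :=
    ⟨l.length - 1, (Nat.succ_pred_eq_of_pos (List.length_pos_iff.mpr h)).symm⟩
  have hrange : ((l.length : Int) - 1) = (m : Int) := by omega
  rw [hrange, PySem.List.pyRange_zero_natCast, List.map_map]
  apply List.ext_getElem
  · simp [hm]
  · intro i hi _
    simp only [List.getElem_map, List.getElem_range, Function.comp_apply]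
    have hi' : i < m := by simpa using hi
    have h1 : PySem.List.pyGetD l (i : Int) (0, 0) = l[i]'(by omega) := by
      rw [PySem.List.pyGetD_natCast]
      simp [List.getD]
      rw [List.getElem?_eq_getElem (by omega), Option.getD_some]
    have h2 : PySem.List.pyGetD l ((i : Int) + 1) (0, 0) = l[i + 1]'(by omega) := by
      have : ((i : Int) + 1) = ((i + 1 : Nat) : Int) := by push_cast; ring
      rw [this, PySem.List.pyGetD_natCast]
      simp [List.getD]
      rw [List.getElem?_eq_getElem (by omega), Option.getD_some]
    rw [h1, h2]
    simp [List.getElem_zip, List.getElem_tail]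

-- folding min over the 2-element candidate chunks of a flatMap
lemma foldl_min_flatMap (n : Int) (L : List ((Int × Int) × (Int × Int))) : ∀ (seed : Int),
    (L.flatMap (fun p => [p.1.2 * 2 + n - p.2.1, (n - p.2.1) * 2 + p.1.2])).foldl min seed
      = L.foldl (fun res p =>
          min (min res (p.1.2 * 2 + n - p.2.1)) ((n - p.2.1) * 2 + p.1.2)) seed := by
  induction L with
  | nil => intro seed; simp
  | cons x t ih =>
    intro seed
    simp only [List.flatMap_cons, List.foldl_append, List.foldl_cons, List.foldl_nil, ih]

-- min-fold membership / lower bound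
lemma foldl_min_mem (l : List Int) : ∀ (a : Int), l.foldl min a ∈ a :: l := by
  induction l with
  | nil => intro a; simp
  | cons x t ih =>
    intro a
    rcases List.mem_cons.mp (ih (min a x)) with h | h
    · rw [List.foldl_cons, h]
      rcases le_total a x with h1 | h1
      · simp [min_eq_left h1]
      · simp [min_eq_right h1]
    · simp [List.foldl_cons, h]

lemma foldl_min_le (l : List Int) : ∀ (a : Int) (x : Int), x ∈ a :: l → l.foldl min a ≤ x := by
  induction l with
  | nil => intro a x hx; simp at hx; simp [hx]
  | cons y t ih =>
    intro a x hx
    have hbase : t.foldl min (min a y) ≤ min a y := ih _ _ (by simp)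
    rw [List.foldl_cons]
    rcases List.mem_cons.mp hx with h | h
    · have := min_le_left a y; omega
    · rcases List.mem_cons.mp h with h' | h'
      · have := min_le_right a y; omega
      · exact ih _ _ (by simp [h'])

-- ---- the chain facts: runsAux (from offset m) as boundary structure ----

def chainOf (cs t : List Char) (st : Option Int) (m : Nat) : List (Int × Int) :=
  runsAux t st (m : Int) ++ [((cs.length : Int), 0)]

lemma zip_tail_cons {β : Type} [Inhabited β] (x : β) (ys : List β) (h : ys ≠ []) :
    (x :: ys).zip (x :: ys).tail = (x, ys.headI) :: ys.zip ys.tail := by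
  cases ys with
  | nil => exact absurd rfl h
  | cons y t => rfl

lemma chain_facts (cs : List Char) : ∀ (t : List Char) (m : Nat) (st : Option Int),
    cs.drop m = t → m ≤ cs.length →
    (st = none ∨ (1 ≤ m ∧ goodC cs (m - 1) = true)) →
    (chainOf cs t st m ≠ [] ∧
      (∀ l, st = some l → (chainOf cs t st m).headI.1 = l) ∧
      (st = none → (chainOf cs t st m).headI.1 = (nFL cs m : Int))) ∧
    (∀ p ∈ (chainOf cs t st m).zip (chainOf cs t st m).tail,
        ∃ j : Nat, j < cs.length ∧ goodC cs j = true ∧ p.1.2 = (j : Int) ∧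
          p.2.1 = (nFL cs (j + 1) : Int)) ∧
    (∀ j : Nat, (match st with | none => m | some _ => m - 1) ≤ j → j < cs.length →
        goodC cs j = true → (j + 1 = cs.length ∨ goodC cs (j + 1) = false) →
        ∃ p ∈ (chainOf cs t st m).zip (chainOf cs t st m).tail,
          p.1.2 = (j : Int) ∧ p.2.1 = (nFL cs (j + 1) : Int)) := by
  intro t
  induction t with
  | nil =>
    intro m st hdrop hm hinv
    have hmn : m = cs.length := by
      have := List.drop_eq_nil_iff.mp hdrop
      omega
    cases st with
    | none =>
      have hch : chainOf cs [] none m = [((cs.length : Int), 0)] := by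
        simp [chainOf, runsAux]
      refine ⟨⟨?_, ?_, ?_⟩, ?_, ?_⟩
      · simp [hch]
      · intro l hl; cases hl
      · intro _
        rw [hch, hmn, nFL_top]
        rfl
      · intro p hp
        rw [hch] at hp
        simp at hp
      · intro j hj1 hj2 _ _
        have hj1' : m ≤ j := hj1
        omega
    | some l =>
      rcases hinv with h | ⟨hm1, hgood⟩
      · cases h
      have hch : chainOf cs [] (some l) m = [(l, (m : Int) - 1), ((cs.length : Int), 0)] := by
        simp [chainOf, runsAux]
      have hpair : (chainOf cs [] (some l) m).zip (chainOf cs [] (some l) m).tail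
          = [((l, (m : Int) - 1), ((cs.length : Int), 0))] := by
        rw [hch]
        rfl
      have hj : ((m : Int) - 1) = ((m - 1 : Nat) : Int) := by push_cast [hm1]; ring
      have hnfl : (cs.length : Int) = (nFL cs ((m - 1) + 1) : Int) := by
        rw [show m - 1 + 1 = m from by omega, hmn, nFL_top]
      refine ⟨⟨?_, ?_, ?_⟩, ?_, ?_⟩
      · simp [hch]
      · intro l' hl'; cases hl'; simp [hch]
      · intro h; cases h
      · intro p hp
        rw [hpair] at hp
        simp only [List.mem_singleton] at hp
        subst hp
        exact ⟨m - 1, by omega, hgood, hj, hnfl⟩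
      · intro j hj1 hj2 hj3 _
        have hj1' : m - 1 ≤ j := hj1
        have : j = m - 1 := by omega
        subst this
        exact ⟨((l, (m : Int) - 1), ((cs.length : Int), 0)), by rw [hpair]; simp, hj, hnfl⟩
  | cons c t ih =>
    intro m st hdrop hm hinv
    have hmn : m < cs.length := by
      by_contra hcc
      rw [List.drop_eq_nil_of_le (by omega)] at hdrop
      cases hdrop
    have hdrop' : cs.drop (m + 1) = t := by
      have h1 := congrArg (List.drop 1) hdrop
      rw [List.drop_drop] at h1
      simpa using h1
    have hgc : cs.getD m 'A' = c := getD_eq_of_drop cs m c t hdrop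
    have hcast : (m : Int) + 1 = ((m + 1 : Nat) : Int) := by push_cast; ring
    by_cases hc : c = 'A'
    · -- current char is 'A'
      have hbad : goodC cs m = false := by
        unfold goodC; rw [hgc, hc]; rfl
      cases st with
      | none =>
        have hch : chainOf cs (c :: t) none m = chainOf cs t none (m + 1) := by
          unfold chainOf
          rw [show runsAux (c :: t) none ((m : Int)) = runsAux t none ((m : Int) + 1) from by
                simp [runsAux, hc],
              hcast]
        obtain ⟨⟨i1, _, i3⟩, i4, i5⟩ := ih (m + 1) none hdrop' (by omega) (Or.inl rfl)
        refine ⟨⟨?_, ?_, ?_⟩, ?_, ?_⟩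
        · rw [hch]; exact i1
        · intro l hl; cases hl
        · intro _
          rw [hch, i3 rfl, nFL_of_bad cs m hmn hbad]
        · intro p hp
          rw [hch] at hp
          exact i4 p hp
        · intro j hj1 hj2 hj3 hj4
          have hj1' : m ≤ j := hj1
          have hjm : m + 1 ≤ j := by
            have : j ≠ m := by
              intro h; subst h; rw [hj3] at hbad; cases hbad
            omega
          rw [hch]
          exact i5 j hjm hj2 hj3 hj4
      | some l =>
        have hm1 : 1 ≤ m ∧ goodC cs (m - 1) = true := by
          rcases hinv with h | h
          · cases h
          · exact h
        obtain ⟨hm1', hgoodp⟩ := hm1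
        have hch : chainOf cs (c :: t) (some l) m
            = (l, (m : Int) - 1) :: chainOf cs t none (m + 1) := by
          unfold chainOf
          rw [show runsAux (c :: t) (some l) ((m : Int))
                = (l, (m : Int) - 1) :: runsAux t none ((m : Int) + 1) from by
                simp [runsAux, hc],
              hcast]
          rfl
        obtain ⟨⟨i1, _, i3⟩, i4, i5⟩ := ih (m + 1) none hdrop' (by omega) (Or.inl rfl)
        have hzip : (chainOf cs (c :: t) (some l) m).zip (chainOf cs (c :: t) (some l) m).tail
            = ((l, (m : Int) - 1), (chainOf cs t none (m + 1)).headI) ::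
                (chainOf cs t none (m + 1)).zip (chainOf cs t none (m + 1)).tail := by
          rw [hch, zip_tail_cons _ _ i1]
        have hjc : ((m : Int) - 1) = ((m - 1 : Nat) : Int) := by push_cast [hm1']; ring
        have hnf : (chainOf cs t none (m + 1)).headI.1 = (nFL cs ((m - 1) + 1) : Int) := by
          rw [i3 rfl, show m - 1 + 1 = m from by omega, nFL_of_bad cs m hmn hbad]
        refine ⟨⟨?_, ?_, ?_⟩, ?_, ?_⟩
        · simp [hch]
        · intro l' hl'; cases hl'; simp [hch]
        · intro h; cases h
        · intro p hp
          rw [hzip] at hp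
          rcases List.mem_cons.mp hp with h | h
          · subst h
            exact ⟨m - 1, by omega, hgoodp, hjc, hnf⟩
          · exact i4 p h
        · intro j hj1 hj2 hj3 hj4
          have hj1' : m - 1 ≤ j := hj1
          by_cases hje : j = m - 1
          · subst hje
            refine ⟨((l, (m : Int) - 1), (chainOf cs t none (m + 1)).headI), ?_, hjc, hnf⟩
            rw [hzip]
            exact List.mem_cons_self
          · have hjm : m + 1 ≤ j := by
              have : j ≠ m := by
                intro h; subst h; rw [hj3] at hbad; cases hbad
              omega
            obtain ⟨p, hp, hp2⟩ := i5 j hjm hj2 hj3 hj4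
            exact ⟨p, by rw [hzip]; exact List.mem_cons_of_mem _ hp, hp2⟩
    · -- current char is not 'A'
      have hgood : goodC cs m = true := by
        unfold goodC; rw [hgc]; simpa using hc
      cases st with
      | none =>
        have hch : chainOf cs (c :: t) none m = chainOf cs t (some (m : Int)) (m + 1) := by
          unfold chainOf
          rw [show runsAux (c :: t) none ((m : Int)) = runsAux t (some (m : Int)) ((m : Int) + 1) from by
                simp [runsAux, hc],
              hcast]
        obtain ⟨⟨i1, i2, _⟩, i4, i5⟩ := ih (m + 1) (some (m : Int)) hdrop' (by omega)
          (Or.inr ⟨by omega, by simpa using hgood⟩)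
        refine ⟨⟨?_, ?_, ?_⟩, ?_, ?_⟩
        · rw [hch]; exact i1
        · intro l hl; cases hl
        · intro _
          rw [hch, i2 (m : Int) rfl, nFL_of_good cs m hgood]
        · intro p hp
          rw [hch] at hp
          exact i4 p hp
        · intro j hj1 hj2 hj3 hj4
          have hj1' : m ≤ j := hj1
          have hb2 : m + 1 - 1 ≤ j := by omega
          rw [hch]
          exact i5 j hb2 hj2 hj3 hj4
      | some l =>
        have hm1 : 1 ≤ m ∧ goodC cs (m - 1) = true := by
          rcases hinv with h | h
          · cases h
          · exact h
        obtain ⟨hm1', hgoodp⟩ := hm1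
        have hch : chainOf cs (c :: t) (some l) m = chainOf cs t (some l) (m + 1) := by
          unfold chainOf
          rw [show runsAux (c :: t) (some l) ((m : Int)) = runsAux t (some l) ((m : Int) + 1) from by
                simp [runsAux, hc],
              hcast]
        obtain ⟨⟨i1, i2, _⟩, i4, i5⟩ := ih (m + 1) (some l) hdrop' (by omega)
          (Or.inr ⟨by omega, by simpa using hgood⟩)
        refine ⟨⟨?_, ?_, ?_⟩, ?_, ?_⟩
        · rw [hch]; exact i1
        · intro l' hl'
          injection hl' with hll
          subst hll
          rw [hch]
          exact i2 _ rfl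
        · intro h; cases h
        · intro p hp
          rw [hch] at hp
          exact i4 p hp
        · intro j hj1 hj2 hj3 hj4
          have hj1' : m - 1 ≤ j := hj1
          by_cases hje : j = m - 1
          · exfalso
            subst hje
            have hjp : m - 1 + 1 = m := by omega
            rcases hj4 with h | h
            · omega
            · rw [hjp] at h
              rw [h] at hgood; cases hgood
          · have hb2 : m + 1 - 1 ≤ j := by omega
            rw [hch]
            exact i5 j hb2 hj2 hj3 hj4

-- ---- the core identities ----

-- no-'A' case: every index is good, the minimum over splits is n-1
lemma mval_all_good (cs : List Char) (h1 : cs ≠ [])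
    (hg : ∀ j, j < cs.length → goodC cs j = true) :
    mval cs cs.length = (cs.length : Int) - 1 := by
  have hn : 1 ≤ cs.length := List.length_pos_iff.mpr h1
  have hups : ∀ k, k ≤ cs.length → ((cs.length : Int) - 1) ≤ gK cs k := by
    intro k hk
    have hnf : nFL cs k = k := by
      rcases Nat.lt_or_ge k cs.length with h | h
      · exact nFL_of_good cs k (hg k h)
      · have hkk : k = cs.length := by omega
        rw [hkk]; exact nFL_top cs
    cases k with
    | zero =>
      have hr : rFL cs 0 = 0 := rfl
      unfold gK
      rw [hnf, hr]
      push_cast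
      omega
    | succ m =>
      have hr : rFL cs (m + 1) = m := rFL_succ_good cs m (hg m (by omega))
      unfold gK
      rw [hnf, hr]
      push_cast
      omega
  have hlast : gK cs cs.length = (cs.length : Int) - 1 := by
    obtain ⟨m, hm⟩ : ∃ m, cs.length = m + 1 := ⟨cs.length - 1, by omega⟩
    have hr : rFL cs cs.length = m := by
      rw [hm]; exact rFL_succ_good cs m (hg m (by omega))
    unfold gK
    rw [nFL_top, hr, hm]
    push_cast
    omega
  have hle := mval_le cs cs.length cs.length (le_refl _)
  obtain ⟨k0, hk0, hv⟩ := mval_mem cs cs.length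
  have hlo := hups k0 hk0
  rw [hlast] at hle
  omega

-- 'A'-present case: the split-scan minimum equals chk_min_move over the run chain
lemma min_core (cs : List Char) (hA : 'A' ∈ cs) :
    chk_min_move (runsAux cs none 0 ++ [((cs.length : Int), 0)]) (cs.length : Int)
      = mval cs cs.length := by
  obtain ⟨⟨hne, _, hhead⟩, H2, H3⟩ := chain_facts cs cs 0 none (by simp) (by omega) (Or.inl rfl)
  have hch0 : chainOf cs cs none 0 = runsAux cs none 0 ++ [((cs.length : Int), 0)] := by
    unfold chainOf
    norm_num
  rw [← hch0]
  rw [hch0] at hne hhead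
  rw [← hch0] at hne hhead
  -- abbreviations
  have hnF0 : (nFL cs 0 : Int) ≤ (cs.length : Int) := by
    exact_mod_cast nFL_le cs 0 (by omega)
  -- chk_min_move as a min-fold over the flatMap of adjacent pairs
  have hseed : (PySem.List.pyGetD (chainOf cs cs none 0) 0 ((0 : Int), (0 : Int))).1
      = (chainOf cs cs none 0).headI.1 := by
    cases hcc : chainOf cs cs none 0 with
    | nil => exact absurd hcc hne
    | cons x r => simp [PySem.List.pyGetD_zero]
  have hfold : chk_min_move (chainOf cs cs none 0) (cs.length : Int)
      = (((chainOf cs cs none 0).zip (chainOf cs cs none 0).tail).flatMap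
          (fun p => [p.1.2 * 2 + (cs.length : Int) - p.2.1,
                     ((cs.length : Int) - p.2.1) * 2 + p.1.2])).foldl min
          ((cs.length : Int) - (chainOf cs cs none 0).headI.1) := by
    rw [chk_min_move, ← map_adjacent_eq_zip _ hne, hseed,
        foldl_min_flatMap (cs.length : Int), List.foldl_map]
  rw [hfold]
  set L := ((chainOf cs cs none 0).zip (chainOf cs cs none 0).tail).flatMap
      (fun p => [p.1.2 * 2 + (cs.length : Int) - p.2.1,
                 ((cs.length : Int) - p.2.1) * 2 + p.1.2]) with hL
  set a := (cs.length : Int) - (chainOf cs cs none 0).headI.1 with ha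
  have ha' : a = (cs.length : Int) - (nFL cs 0 : Int) := by rw [ha, hhead rfl]
  -- direction 1: mval ≤ the fold
  have hd1 : mval cs cs.length ≤ L.foldl min a := by
    rcases List.mem_cons.mp (foldl_min_mem L a) with hm | hm
    · -- the fold equals the seed
      rw [hm, ha']
      calc mval cs cs.length ≤ gK cs 0 := mval_le cs cs.length 0 (by omega)
        _ ≤ 2 * (rFL cs 0 : Int) + ((cs.length : Int) - (nFL cs 0 : Int)) := min_le_left _ _
        _ = (cs.length : Int) - (nFL cs 0 : Int) := by
            rw [show rFL cs 0 = 0 from rfl]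
            push_cast
            ring
    · -- the fold equals some pair candidate
      obtain ⟨p, hp, hx⟩ := List.mem_flatMap.mp hm
      obtain ⟨j, hjn, hgj, hp1, hp2⟩ := H2 p hp
      have hr : rFL cs (j + 1) = j := rFL_succ_good cs j hgj
      have hgk : gK cs (j + 1)
          = min (p.1.2 * 2 + (cs.length : Int) - p.2.1)
                (((cs.length : Int) - p.2.1) * 2 + p.1.2) := by
        unfold gK
        rw [hr, hp1, hp2]
        congr 1 <;> ring
      have hmle : mval cs cs.length ≤ gK cs (j + 1) := mval_le cs cs.length (j + 1) (by omega)
      rcases List.mem_cons.mp hx with h | h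
      · rw [← h] at hgk
        have := min_le_left (L.foldl min a)
          (((cs.length : Int) - p.2.1) * 2 + p.1.2)
        omega
      · have h' : L.foldl min a = ((cs.length : Int) - p.2.1) * 2 + p.1.2 := by
          simpa using h
        rw [← h'] at hgk
        have := min_le_right (p.1.2 * 2 + (cs.length : Int) - p.2.1) (L.foldl min a)
        omega
  -- direction 2: the fold ≤ mval
  have hd2 : L.foldl min a ≤ mval cs cs.length := by
    obtain ⟨k0, hk0, hv⟩ := mval_mem cs cs.length
    rw [hv]
    by_cases hall : ∀ j', j' < k0 → goodC cs j' = false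
    · -- nothing good below k0: gK k0 equals the seed a
      have hr0 : rFL cs k0 = 0 := rFL_all_bad cs k0 hall
      have hnf : nFL cs 0 = nFL cs k0 := by
        have := nFL_congr_range cs k0 0 (by omega) (fun i _ hi2 => hall i (by omega))
        simpa using this
      have hgk : gK cs k0 = a := by
        unfold gK
        rw [hr0, ← hnf, ha']
        push_cast
        rw [min_eq_left (by omega)]
        ring
      rw [hgk]
      exact foldl_min_le L a a (by simp)
    · -- there is a good index below k0; let j be the last one
      obtain ⟨j', hj', hgj'⟩ : ∃ j', j' < k0 ∧ goodC cs j' = true := by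
        push_neg at hall
        obtain ⟨j', h1, h2⟩ := hall
        exact ⟨j', h1, by simpa using h2⟩
      obtain ⟨hgr, hrlt, hrmax⟩ := rFL_spec cs k0 ⟨j', hj', hgj'⟩
      have hjn : rFL cs k0 < cs.length := by
        have := goodC_lt cs (rFL cs k0) hgr
        omega
      have hnfj : nFL cs (rFL cs k0 + 1) = nFL cs k0 := by
        have := nFL_congr_range cs (k0 - (rFL cs k0 + 1)) (rFL cs k0 + 1) (by omega)
          (fun i hi1 hi2 => hrmax i (by omega) (by omega))
        rw [this]
        congr 1
        omega
      by_cases hb : rFL cs k0 + 1 = cs.length ∨ goodC cs (rFL cs k0 + 1) = false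
      · -- j is a run boundary: gK k0 is exactly the min of j's two candidates
        obtain ⟨p, hp, hp1, hp2⟩ := H3 (rFL cs k0) (Nat.zero_le _) hjn hgr hb
        have hgk : gK cs k0
            = min (p.1.2 * 2 + (cs.length : Int) - p.2.1)
                  (((cs.length : Int) - p.2.1) * 2 + p.1.2) := by
          unfold gK
          rw [hp1, hp2, hnfj]
          congr 1 <;> ring
        rcases le_total (p.1.2 * 2 + (cs.length : Int) - p.2.1)
            (((cs.length : Int) - p.2.1) * 2 + p.1.2) with h | h
        · have hx : (p.1.2 * 2 + (cs.length : Int) - p.2.1) ∈ a :: L := by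
            right
            exact List.mem_flatMap.mpr ⟨p, hp, by simp⟩
          have := foldl_min_le L a _ hx
          rw [hgk, min_eq_left h]
          omega
        · have hx : (((cs.length : Int) - p.2.1) * 2 + p.1.2) ∈ a :: L := by
            right
            exact List.mem_flatMap.mpr ⟨p, hp, by simp⟩
          have := foldl_min_le L a _ hx
          rw [hgk, min_eq_right h]
          omega
      · -- interior split: gK k0 ≥ n - 1 ≥ the last run's right-only candidate
        push_neg at hb
        obtain ⟨hb1, hb2⟩ := hb
        have hgood1 : goodC cs (rFL cs k0 + 1) = true := by
          cases hgb : goodC cs (rFL cs k0 + 1)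
          · exact absurd hgb hb2
          · rfl
        have hjk : rFL cs k0 + 1 = k0 := by
          by_contra hne'
          have : rFL cs k0 + 1 < k0 := by omega
          have := hrmax (rFL cs k0 + 1) (by omega) this
          rw [this] at hgood1; cases hgood1
        have hk0good : goodC cs k0 = true := by rw [← hjk]; exact hgood1
        have hk0lt : k0 < cs.length := goodC_lt cs k0 hk0good
        have hk0ge : 1 ≤ k0 := by omega
        have hnfk0 : nFL cs k0 = k0 := nFL_of_good cs k0 hk0good
        have hrk0 : rFL cs k0 = k0 - 1 := by omega
        have hglow : ((cs.length : Int) - 1) ≤ gK cs k0 := by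
          unfold gK
          rw [hnfk0, hrk0]
          have hc1 : ((k0 - 1 : Nat) : Int) = (k0 : Int) - 1 := by push_cast [hk0ge]; ring
          rw [hc1]
          apply le_min <;> push_cast <;> omega
        -- the last non-'A' index overall, j* = rFL n, yields candidate j* ≤ n - 1
        obtain ⟨hgs, hslt, hsmax⟩ := rFL_spec cs cs.length
          ⟨k0, hk0lt, hk0good⟩
        have hnfs : nFL cs (rFL cs cs.length + 1) = cs.length := by
          apply nFL_all_bad cs _ (by omega)
          intro i hi1 hi2
          exact hsmax i (by omega) hi2
        have hbs : rFL cs cs.length + 1 = cs.length ∨ goodC cs (rFL cs cs.length + 1) = false := by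
          by_cases h : rFL cs cs.length + 1 = cs.length
          · exact Or.inl h
          · exact Or.inr (hsmax (rFL cs cs.length + 1) (by omega) (by omega))
        obtain ⟨p, hp, hp1, hp2⟩ := H3 (rFL cs cs.length) (Nat.zero_le _) hslt hgs hbs
        have hcand : (((cs.length : Int) - p.2.1) * 2 + p.1.2) ∈ a :: L := by
          right
          exact List.mem_flatMap.mpr ⟨p, hp, by simp⟩
        have hval : ((cs.length : Int) - p.2.1) * 2 + p.1.2 = (rFL cs cs.length : Int) := by
          rw [hp1, hp2, hnfs]
          ring
        have := foldl_min_le L a _ hcand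
        rw [hval] at this
        have hsle : (rFL cs cs.length : Int) ≤ (cs.length : Int) - 1 := by
          push_cast
          omega
        omega
  omega

-- ===== VERDICT (by name: the statements are the Claim_ definitions above) =====
theorem solve_spec : Claim_unchanged_solve := by
  intro s _ hD
  show solve s = solve_alt s
  have hne : s.toList ≠ [] := by
    intro hh
    apply hD
    unfold D_solve
    exact String.toList_eq_nil_iff.mp hh
  simp only [solve, solve_alt]
  have hloop := loop_inv s.toList s.toList.length (le_refl _)
  by_cases h : PySem.Str.isIn "A" s = false
  · rw [if_pos h, joy_eq]
    have hAll : ∀ j, j < s.toList.length → goodC s.toList j = true := by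
      intro j hj
      by_contra hbad
      have hb : s.toList.getD j 'A' = 'A' := by
        simpa [goodC] using hbad
      have hmem : 'A' ∈ s.toList := by
        rw [List.getD_eq_getElem?_getD, List.getElem?_eq_getElem hj] at hb
        simp only [Option.getD_some] at hb
        exact hb ▸ List.getElem_mem hj
      obtain ⟨u, v, huv⟩ := List.append_of_mem hmem
      have ht : PySem.Str.isIn "A" s = true :=
        (PySem.Str.isIn_iff_infix "A" s).mpr ⟨u, v, by rw [huv]; simp⟩
      rw [ht] at h
      cases h
    simp only [hloop, Option.getD_some]
    rw [mval_all_good s.toList hne hAll]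
    ring
  · rw [if_neg h]
    have hA : 'A' ∈ s.toList := by
      have ht : PySem.Str.isIn "A" s = true := by
        cases hb : PySem.Str.isIn "A" s
        · exact absurd hb h
        · rfl
      obtain ⟨u, v, huv⟩ := (PySem.Str.isIn_iff_infix "A" s).mp ht
      rw [← huv]
      simp
    set st := (PySem.List.enumerate s.toList).foldl solveStep
      ((PySem.List.pyGet? s.toList 0 == some 'A'), 0, ([] : List (Int × Int))) with hst
    have hflag : (PySem.List.pyGet? s.toList (-1) != some 'A') = !st.1 := by
      rw [pyGet?_neg_one' _ hne, hst, machine_isA _ 0 _ hne]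
      cases hgl : s.toList.getLast? with
      | none => simp
      | some v => by_cases hv : v = 'A' <;> simp [hv]
    have hif : (if (PySem.List.pyGet? s.toList (-1) != some 'A') = true
                then st.2.2 ++ [(st.2.1, (s.toList.length : Int) - 1)] else st.2.2)
        = (if st.1 = true then st.2.2
           else st.2.2 ++ [(st.2.1, (s.toList.length : Int) - 1)]) := by
      rw [hflag]; cases st.1 <;> simp
    have mspec := machine_spec s.toList 0 0 []
      (PySem.List.pyGet? s.toList 0 == some 'A')
    rw [← hst] at mspec
    simp only [zero_add, List.nil_append] at mspec
    rw [hif, mspec, runsAux_head _ hne, min_core s.toList hA, joy_eq _ 0, zero_add]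
    simp only [hloop, Option.getD_some]
    ring

theorem solve_changed : Claim_changed_solve := by
  unfold Claim_changed_solve; decide

theorem solve_tight : Claim_exact_solve := by
  intro s _ hD
  unfold D_solve at hD
  subst hD
  decide
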